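-- pv_equiv track=rewrite | github.com/pl1ntuc/laba1_SD | структуры.py | max_gcd_split
-- ===== SOURCE A (Python) =====
-- import math
--
-- def max_gcd_split(N):
--     max_d = 1
--     for i in range(1, int(math.sqrt(N)) + 1):
--         if N % i == 0:
--             if i <= N // 2:
--                 max_d = max(max_d, i)
--             if N // i <= N // 2:
--                 max_d = max(max_d, N // i)
--     return max_d, N - max_d
-- ===== SOURCE B (Python) =====
-- def max_gcd_split(N):
--     d = 2
--     while d * d <= N:
--         if N % d == 0:
--             m = N // d
--             return m, N - m
--         d += 1
--     return 1, N - 1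
-- ===== Notes on version B (the rewrite author's own statement) =====
-- stated objective: simpler
-- what changed: A enumerates every i up to sqrt(N) and keeps a running max over all divisors <= N//2; B instead finds the smallest divisor d >= 2 by trial division with an early exit and returns (N//d, N - N//d), defaulting to (1, N-1) when none exists -- one short integer-only loop that stops at the first factor, no max tracking and no floating sqrt.
import Mathlib
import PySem

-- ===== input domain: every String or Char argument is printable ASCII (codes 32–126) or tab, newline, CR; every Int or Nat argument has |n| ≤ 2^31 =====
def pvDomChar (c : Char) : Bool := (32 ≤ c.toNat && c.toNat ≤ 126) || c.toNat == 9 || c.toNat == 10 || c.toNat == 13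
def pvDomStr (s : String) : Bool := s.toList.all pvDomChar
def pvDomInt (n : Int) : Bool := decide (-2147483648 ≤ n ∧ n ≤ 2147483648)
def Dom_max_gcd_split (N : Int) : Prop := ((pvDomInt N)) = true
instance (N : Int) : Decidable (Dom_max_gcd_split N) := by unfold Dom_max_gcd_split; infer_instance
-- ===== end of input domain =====

-- B replaces A's enumerate-all-divisors-and-keep-the-max scan up to sqrt(N) by an
-- early-exit trial division for the smallest divisor >= 2 (simpler: one integer-only
-- loop, no max tracking, no floating sqrt); return value equivalence proved for N >= 0.


-- ===== PORT A =====
-- loop body of A, one step for one i: 'if N % i == 0: if i <= N//2: max_d = max(max_d,i); if N//i <= N//2: max_d = max(max_d, N//i)'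
def stepA (N max_d i : Int) : Int :=
  if PySem.Int.mod N i = 0 then
    let md1 := if i ≤ PySem.Int.floordiv N 2 then max max_d i else max_d
    if PySem.Int.floordiv N i ≤ PySem.Int.floordiv N 2 then max md1 (PySem.Int.floordiv N i) else md1
  else max_d

-- 'int(math.sqrt(N))' is ported as Int.sqrt N: exact for the admitted inputs 0 ≤ N ≤ 2^31
-- (the correctly rounded double sqrt cannot cross an integer there); on N < 0 Python's
-- math.sqrt raises ValueError — those inputs are excluded by Pre_max_gcd_split.
def max_gcd_split (N : Int) : Int × Int :=
  let max_d := (PySem.List.pyRange 1 (Int.sqrt N + 1) 1).foldl (stepA N) 1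
  (max_d, N - max_d)

-- ===== PORT B =====
-- B's while loop 'd = 2; while d*d <= N: ...; d += 1', ported with an explicit fuel
-- counter (structural recursion): fuel N.toNat + 2 exceeds the number of iterations,
-- and the fuel-0 value equals the loop-exit value, so the port is exact.
def altLoop (N d : Int) : Nat → Int × Int
  | 0 => (1, N - 1)
  | fuel + 1 =>
    if d * d ≤ N then
      if PySem.Int.mod N d = 0 then
        let m := PySem.Int.floordiv N d
        (m, N - m)
      else altLoop N (d + 1) fuel
    else (1, N - 1)

def max_gcd_split_alt (N : Int) : Int × Int := altLoop N 2 (N.toNat + 2)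

-- ===== PRECONDITION & SPEC =====
-- Python's math.sqrt raises ValueError on negative input, so A raises for N < 0.
def Pre_max_gcd_split (N : Int) : Prop := 0 ≤ N
instance (N : Int) : Decidable (Pre_max_gcd_split N) := by unfold Pre_max_gcd_split; infer_instance
def pvWitness_max_gcd_split : Int := 12

def Spec_max_gcd_split (N : Int) (out : Int × Int) : Prop := out = max_gcd_split_alt N
instance (N : Int) (out : Int × Int) : Decidable (Spec_max_gcd_split N out) := by unfold Spec_max_gcd_split; infer_instance

-- ===== CLAIM (what is proved, stated in full; the proofs are below) =====
def Claim_equal_max_gcd_split : Prop := ∀ (N : Int), Dom_max_gcd_split N → Pre_max_gcd_split N → Spec_max_gcd_split N (max_gcd_split N)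

-- ===== LEMMAS AND PROOFS =====

-- A's loop body after rewriting the Python %, // (positive divisors) into Int emod/ediv
def stepA' (N md i : Int) : Int :=
  if N % i = 0 then
    let md1 := if i ≤ N / 2 then max md i else md
    if N / i ≤ N / 2 then max md1 (N / i) else md1
  else md

lemma stepA_eq (N md i : Int) (hi : 0 < i) : stepA N md i = stepA' N md i := by
  simp only [stepA, stepA', PySem.Int.mod_eq_emod_of_pos hi,
    PySem.Int.floordiv_eq_ediv_of_pos hi,
    PySem.Int.floordiv_eq_ediv_of_pos (show (0:Int) < 2 by norm_num)]

lemma foldl_stepA_eq (N : Int) (l : List Int) (hl : ∀ j ∈ l, 0 < j) :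
    ∀ acc, l.foldl (stepA N) acc = l.foldl (stepA' N) acc := by
  induction l with
  | nil => intro acc; rfl
  | cons x xs ih =>
      intro acc
      have hx : 0 < x := hl x (by simp)
      simp only [List.foldl_cons, stepA_eq N acc x hx]
      exact ih (fun j hj => hl j (by simp [hj])) _

lemma stepA'_ge (N md i : Int) : md ≤ stepA' N md i := by
  simp only [stepA']
  split_ifs
  all_goals try exact le_refl _
  all_goals try exact le_max_left _ _
  all_goals exact le_trans (le_max_left _ i) (le_max_left _ _)

lemma foldl_stepA'_mono (N : Int) (l : List Int) :
    ∀ acc, acc ≤ l.foldl (stepA' N) acc := by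
  induction l with
  | nil => intro acc; exact le_refl _
  | cons x xs ih =>
      intro acc
      exact le_trans (stepA'_ge N acc x) (ih _)

lemma foldl_stepA'_mem (N : Int) (l : List Int) :
    ∀ acc i, i ∈ l → N % i = 0 → N / i ≤ N / 2 → N / i ≤ l.foldl (stepA' N) acc := by
  induction l with
  | nil => intro acc i h; simp at h
  | cons x xs ih =>
      intro acc i hmem hmod hle
      rcases List.mem_cons.mp hmem with rfl | htl
      · have h1 : N / i ≤ stepA' N acc i := by
          simp only [stepA', hmod, if_pos hle]
          exact le_max_right _ _
        exact le_trans h1 (foldl_stepA'_mono N xs _)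
      · exact ih _ i htl hmod hle

lemma stepA'_closed (N md i : Int) (hi : 0 < i)
    (h : md = 1 ∨ (md ∣ N ∧ md ≤ N / 2)) :
    stepA' N md i = 1 ∨ (stepA' N md i ∣ N ∧ stepA' N md i ≤ N / 2) := by
  have hdvdi : N % i = 0 → (N / i) ∣ N := by
    intro hmod
    have hdvd : i ∣ N := Int.dvd_of_emod_eq_zero hmod
    obtain ⟨c, hc⟩ := hdvd
    have : N / i = c := by rw [hc, Int.mul_ediv_cancel_left _ (by omega : i ≠ 0)]
    rw [this, hc]; exact Dvd.intro_left i rfl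
  by_cases h1 : N % i = 0
  · by_cases h2 : i ≤ N / 2 <;> by_cases h3 : N / i ≤ N / 2 <;>
      simp only [stepA', h1, h2, h3, if_pos, if_neg, not_false_iff]
    · rcases max_choice (max md i) (N / i) with he | he <;> rw [he]
      · rcases max_choice md i with he2 | he2 <;> rw [he2]
        · exact h
        · exact Or.inr ⟨Int.dvd_of_emod_eq_zero h1, h2⟩
      · exact Or.inr ⟨hdvdi h1, h3⟩
    · rcases max_choice md i with he2 | he2 <;> rw [he2]
      · exact h
      · exact Or.inr ⟨Int.dvd_of_emod_eq_zero h1, h2⟩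
    · rcases max_choice md (N / i) with he | he <;> rw [he]
      · exact h
      · exact Or.inr ⟨hdvdi h1, h3⟩
    · exact h
  · simpa only [stepA', h1, if_neg, ite_false, not_false_iff] using h

lemma foldl_stepA'_closed (N : Int) (l : List Int) :
    ∀ acc, (∀ j ∈ l, 0 < j) → (acc = 1 ∨ (acc ∣ N ∧ acc ≤ N / 2)) →
      (l.foldl (stepA' N) acc = 1 ∨ (l.foldl (stepA' N) acc ∣ N ∧ l.foldl (stepA' N) acc ≤ N / 2)) := by
  induction l with
  | nil => intro acc _ h; exact h
  | cons x xs ih =>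
      intro acc hl h
      exact ih _ (fun j hj => hl j (by simp [hj]))
        (stepA'_closed N acc x (hl x (by simp)) h)

-- p ≤ isqrt N ↔ p*p ≤ N, for 0 ≤ p, 0 ≤ N
lemma le_sqrt_iff (N p : Int) (hN : 0 ≤ N) (hp : 0 ≤ p) : p ≤ Int.sqrt N ↔ p * p ≤ N := by
  obtain ⟨n, rfl⟩ := Int.eq_ofNat_of_zero_le hN
  obtain ⟨q, rfl⟩ := Int.eq_ofNat_of_zero_le hp
  rw [Int.sqrt]
  norm_cast
  rw [Nat.le_sqrt', pow_two]

-- altLoop when no divisor d with d*d ≤ N exists from the current d on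
lemma altLoop_none (N : Int) : ∀ (fuel : Nat) (d : Int),
    (∀ s : Int, d ≤ s → s * s ≤ N → ¬ PySem.Int.mod N s = 0) →
    altLoop N d fuel = (1, N - 1) := by
  intro fuel
  induction fuel with
  | zero => intro d _; rfl
  | succ k ih =>
      intro d h
      rw [altLoop]
      by_cases hg : d * d ≤ N
      · rw [if_pos hg, if_neg (h d le_rfl hg)]
        exact ih (d + 1) (fun s hs => h s (by omega))
      · rw [if_neg hg]

-- altLoop hits the minimal divisor p (given enough fuel)
lemma altLoop_min (N p : Int) (hp2 : p * p ≤ N) (hpd : PySem.Int.mod N p = 0) :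
    ∀ (fuel : Nat) (d : Int), (p - d).toNat < fuel → 0 < d → d ≤ p →
    (∀ t : Int, d ≤ t → t < p → ¬ PySem.Int.mod N t = 0) →
    altLoop N d fuel = (N / p, N - N / p) := by
  intro fuel
  induction fuel with
  | zero => intro d h; omega
  | succ k ih =>
      intro d hfuel hd0 hdp hmin
      have hg : d * d ≤ N := le_trans (by nlinarith) hp2
      rw [altLoop, if_pos hg]
      by_cases hm : PySem.Int.mod N d = 0
      · have hdep : d = p := by
          by_contra hne
          exact hmin d le_rfl (by omega) hm
        subst hdep
        rw [if_pos hm]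
        simp only [PySem.Int.floordiv_eq_ediv_of_pos hd0]
      · have hdltp : d < p := by
          rcases eq_or_lt_of_le hdp with rfl | h
          · exact absurd hpd hm
          · exact h
        rw [if_neg hm]
        exact ih (d + 1) (by omega) (by omega) (by omega)
          (fun t ht => hmin t (by omega))

-- ===== VERDICT (by name: the statement is the Claim_ definition above) =====
theorem max_gcd_split_spec : Claim_equal_max_gcd_split := by
  intro N _ hN
  unfold Pre_max_gcd_split at hN
  unfold Spec_max_gcd_split max_gcd_split max_gcd_split_alt
  have hpos : ∀ j ∈ PySem.List.pyRange 1 (Int.sqrt N + 1) 1, 0 < j := by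
    intro j hj
    have := (PySem.List.mem_pyRange_one).mp hj
    omega
  rw [foldl_stepA_eq N _ hpos]
  set R := (PySem.List.pyRange 1 (Int.sqrt N + 1) 1).foldl (stepA' N) 1 with hR
  have hR1 : (1:Int) ≤ R := foldl_stepA'_mono N _ 1
  have hRc := foldl_stepA'_closed N _ 1 hpos (Or.inl rfl)
  by_cases hex : ∃ s : Int, 2 ≤ s ∧ s * s ≤ N ∧ N % s = 0
  · -- a divisor with s*s ≤ N exists; take the least one
    have hdec : DecidablePred (fun s : Int => 2 ≤ s ∧ s * s ≤ N ∧ N % s = 0) :=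
      fun s => inferInstance
    obtain ⟨p, ⟨hp1, hp2, hp0⟩, hmin⟩ :=
      Int.exists_least_of_bdd (P := fun s : Int => 2 ≤ s ∧ s * s ≤ N ∧ N % s = 0)
        ⟨2, fun z hz => hz.1⟩ hex
    have hpdvd : p ∣ N := Int.dvd_of_emod_eq_zero hp0
    have hNp_ge : p ≤ N / p := (Int.le_ediv_iff_mul_le (by omega)).mpr hp2
    have hcancel : (N / p) * p = N := Int.ediv_mul_cancel hpdvd
    have hNp_nonneg : 0 ≤ N / p := Int.ediv_nonneg hN (by omega)
    have hNp2 : N / p ≤ N / 2 := by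
      rw [Int.le_ediv_iff_mul_le (by norm_num : (0:Int) < 2)]
      nlinarith
    have hmem : p ∈ PySem.List.pyRange 1 (Int.sqrt N + 1) 1 := by
      rw [PySem.List.mem_pyRange_one]
      have := (le_sqrt_iff N p hN (by omega)).mpr hp2
      omega
    have hA1 : N / p ≤ R := foldl_stepA'_mem N _ 1 p hmem hp0 hNp2
    have hA2 : R ≤ N / p := by
      rcases hRc with h1 | ⟨hdvd, hle⟩
      · omega
      · obtain ⟨c, hc⟩ := hdvd
        have h2R : R * 2 ≤ N := (Int.le_ediv_iff_mul_le (by norm_num)).mp hle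
        have hc2 : 2 ≤ c := by nlinarith
        have hcdvd : N % c = 0 := Int.emod_eq_zero_of_dvd ⟨R, by rw [hc]; ring⟩
        have hpc : p ≤ c := by
          by_contra hlt
          push Not at hlt
          have hcc : c * c ≤ N := by nlinarith
          exact absurd (hmin c ⟨hc2, hcc, hcdvd⟩) (by omega)
        rw [Int.le_ediv_iff_mul_le (by omega : (0:Int) < p)]
        nlinarith
    have hB : altLoop N 2 (N.toNat + 2) = (N / p, N - N / p) := by
      apply altLoop_min N p hp2
        (by rw [PySem.Int.mod_eq_emod_of_pos (by omega : (0:Int) < p)]; exact hp0)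
      · have : p ≤ N := by nlinarith
        omega
      · norm_num
      · exact hp1
      · intro t h2t htp hmod
        rw [PySem.Int.mod_eq_emod_of_pos (by omega : (0:Int) < t)] at hmod
        exact absurd (hmin t ⟨by omega, by nlinarith, hmod⟩) (by omega)
    rw [hB]
    have : R = N / p := le_antisymm hA2 hA1
    rw [this]
  · -- no divisor: both sides return (1, N - 1)
    push Not at hex
    have hnone : ∀ s : Int, 2 ≤ s → s * s ≤ N → ¬ N % s = 0 := by
      intro s h1 h2 h3
      exact (hex s h1 h2) h3
    have hB : altLoop N 2 (N.toNat + 2) = (1, N - 1) :=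
      altLoop_none N _ 2 (fun s hs h2 => by
        rw [PySem.Int.mod_eq_emod_of_pos (by omega : (0:Int) < s)]
        exact hnone s (by omega) h2)
    rw [hB]
    have hA : R = 1 := by
      rcases hRc with h1 | ⟨hdvd, hle⟩
      · exact h1
      · rcases eq_or_lt_of_le hR1 with h1 | hR2
        · omega
        · exfalso
          obtain ⟨c, hc⟩ := hdvd
          have h2R : R * 2 ≤ N := (Int.le_ediv_iff_mul_le (by norm_num)).mp hle
          have hc2 : 2 ≤ c := by nlinarith
          rcases le_or_gt (R * R) N with hsq | hsq
          · exact hnone R (by omega) hsq (Int.emod_eq_zero_of_dvd ⟨c, hc⟩)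
          · have hcR : c < R := by nlinarith
            have hcc : c * c ≤ N := by nlinarith
            exact hnone c hc2 hcc (Int.emod_eq_zero_of_dvd ⟨R, by rw [hc]; ring⟩)
    rw [hA]
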